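-- pv_equiv track=rewrite | github.com/jimmynguyen/advent-of-code | 2015/day14.py | compute_max_score
-- ===== SOURCE A (Python) =====
-- def compute_max_score(distances,total_time):
--     scores = [0] * len(distances)
--     for i in range(total_time):
--         _distances = [d[i] for d in distances]
--         max_distance = max(_distances)
--         for i,d in enumerate(_distances):
--             scores[i] += 1 if d == max_distance else 0
--     return max(scores)
-- ===== SOURCE B (Python) =====
-- def compute_max_score(distances, total_time):
--     steps = range(max(total_time, 0))
--     scores = []
--     for d in distances:
--         leading = [True] * len(steps)
--         for e in distances:
--             leading = [ok and d[t] >= e[t] for t, ok in zip(steps, leading)]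
--         scores.append(sum(leading))
--     return max(scores)
-- ===== Notes on version B (the rewrite author's own statement) =====
-- stated objective: alternative
-- what changed: B never computes a column maximum: a reindeer's score is obtained by pairwise elimination, intersecting boolean 'still leading at step t' masks against every rival (d[t] >= e[t]) and summing the surviving steps; it trades A's max-per-column pass for all-pairs comparisons (O(n^2*t) vs A's O(n*t)).
import Mathlib
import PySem

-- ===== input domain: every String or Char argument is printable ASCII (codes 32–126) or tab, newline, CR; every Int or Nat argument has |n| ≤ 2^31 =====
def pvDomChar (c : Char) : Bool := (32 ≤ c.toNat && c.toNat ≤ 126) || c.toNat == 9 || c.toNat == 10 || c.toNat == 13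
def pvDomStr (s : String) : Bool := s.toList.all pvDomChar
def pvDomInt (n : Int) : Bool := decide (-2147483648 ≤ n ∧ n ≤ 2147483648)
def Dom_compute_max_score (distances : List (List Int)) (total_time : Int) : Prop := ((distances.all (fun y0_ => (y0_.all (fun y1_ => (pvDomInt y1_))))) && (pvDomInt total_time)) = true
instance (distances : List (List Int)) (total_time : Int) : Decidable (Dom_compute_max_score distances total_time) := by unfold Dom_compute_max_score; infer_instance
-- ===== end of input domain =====

-- B replaces A's max-per-column scoring by pairwise elimination: boolean 'leading' masks
-- intersected against every rival, then summed (alternative decomposition, O(n^2*t) vs O(n*t)).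


-- ===== PORT A =====
def compute_max_score (distances : List (List Int)) (total_time : Int) : Int :=
  let scores0 := List.replicate distances.length (0 : Int)
  let scores :=
    (PySem.List.pyRange 0 total_time 1).foldl (fun scores i =>
      let _distances := distances.map (fun d => PySem.List.pyGetD d i 0)
      let max_distance := (PySem.List.max? _distances (fun x => x)).getD 0
      (PySem.List.enumerate _distances).foldl (fun sc p =>
        sc.set p.1.toNat (PySem.List.pyGetD sc p.1 0 + (if p.2 == max_distance then 1 else 0)))
        scores)
      scores0
  (PySem.List.max? scores (fun x => x)).getD 0

-- ===== PORT B =====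
def compute_max_score_alt (distances : List (List Int)) (total_time : Int) : Int :=
  let steps := PySem.List.pyRange 0 (max total_time 0) 1
  let scores := distances.foldl (fun scores d =>
    let leading := distances.foldl (fun leading e =>
      (steps.zip leading).map (fun p =>
        p.2 && decide (PySem.List.pyGetD d p.1 0 ≥ PySem.List.pyGetD e p.1 0)))
      (List.replicate steps.length true)
    scores ++ [((leading.count true : Int))]) []
  (PySem.List.max? scores (fun x => x)).getD 0

-- ===== PRECONDITION & SPEC =====
-- Pre_ excludes exactly the inputs where Python A raises: an empty reindeer list
-- (ValueError from max([])) or a row shorter than total_time (IndexError).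
def Pre_compute_max_score (distances : List (List Int)) (total_time : Int) : Prop :=
  distances ≠ [] ∧ ∀ d ∈ distances, total_time ≤ (d.length : Int)
instance (distances : List (List Int)) (total_time : Int) : Decidable (Pre_compute_max_score distances total_time) := by unfold Pre_compute_max_score; infer_instance
def pvWitness_compute_max_score : List (List Int) × Int := ([[1, 2], [2, 1]], 2)

def Spec_compute_max_score (distances : List (List Int)) (total_time : Int) (out : Int) : Prop := out = compute_max_score_alt distances total_time
instance (distances : List (List Int)) (total_time : Int) (out : Int) : Decidable (Spec_compute_max_score distances total_time out) := by unfold Spec_compute_max_score; infer_instance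

-- ===== CLAIM (what is proved, stated in full; the proofs are below) =====
def Claim_equal_compute_max_score : Prop := ∀ (distances : List (List Int)) (total_time : Int), Dom_compute_max_score distances total_time → Pre_compute_max_score distances total_time → Spec_compute_max_score distances total_time (compute_max_score distances total_time)

-- ===== LEMMAS AND PROOFS =====

-- A's inner enumerate/set loop adds f(y) to each slot, pointwise.
theorem pv_inner (f : Int → Int) :
    ∀ (ys : List Int) (pre cur : List Int), cur.length = ys.length →
    (PySem.List.enumerate ys (pre.length : Int)).foldl
      (fun sc p => sc.set p.1.toNat (PySem.List.pyGetD sc p.1 0 + f p.2)) (pre ++ cur)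
    = pre ++ List.zipWith (fun v y => v + f y) cur ys := by
  intro ys
  induction ys with
  | nil =>
      intro pre cur h
      simp [PySem.List.enumerate_nil, List.length_eq_zero_iff.mp h]
  | cons y ys ih =>
      intro pre cur h
      cases cur with
      | nil => simp at h
      | cons c cur' =>
        simp only [List.length_cons] at h
        rw [PySem.List.enumerate_cons]
        simp only [List.foldl_cons]
        have hget : PySem.List.pyGetD (pre ++ c :: cur') (pre.length : Int) 0 = c := by
          rw [PySem.List.pyGetD_eq_getElem _ _ (Int.natCast_nonneg _) (by simp)]
          simp
        have hset : (pre ++ c :: cur').set ((pre.length : Int)).toNat (c + f y)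
            = (pre ++ [c + f y]) ++ cur' := by
          simp [List.append_assoc]
        rw [hget, hset]
        have hlen : ((pre.length : Int) + 1) = ((pre ++ [c + f y]).length : Int) := by
          simp
        rw [hlen, ih (pre ++ [c + f y]) cur' (by omega)]
        simp [List.append_assoc]

-- A's time loop, characterized: starting from a mapped scores row, each reindeer ends
-- with its start value plus its count of leading steps.
theorem pv_main (distances : List (List Int)) :
    ∀ (ts : List Int) (g : List Int → Int),
    ts.foldl (fun scores i =>
      let _distances := distances.map (fun d => PySem.List.pyGetD d i 0)
      let max_distance := (PySem.List.max? _distances (fun x => x)).getD 0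
      (PySem.List.enumerate _distances).foldl (fun sc p =>
        sc.set p.1.toNat (PySem.List.pyGetD sc p.1 0 + (if p.2 == max_distance then 1 else 0)))
        scores)
      (distances.map g)
    = distances.map (fun d =>
        g d + ((ts.filter (fun t => PySem.List.pyGetD d t 0 == (PySem.List.max? (distances.map (fun d => PySem.List.pyGetD d t 0)) (fun x => x)).getD 0)).length : Int)) := by
  intro ts
  induction ts with
  | nil =>
      intro g; simp
  | cons t ts ih =>
      intro g
      simp only [List.foldl_cons]
      have hstep :
          (PySem.List.enumerate (distances.map (fun d => PySem.List.pyGetD d t 0)) 0).foldl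
            (fun sc p => sc.set p.1.toNat (PySem.List.pyGetD sc p.1 0 +
              (if p.2 == (PySem.List.max? (distances.map (fun d => PySem.List.pyGetD d t 0)) (fun x => x)).getD 0 then 1 else 0))) (distances.map g)
          = distances.map (fun d =>
              g d + (if PySem.List.pyGetD d t 0 == (PySem.List.max? (distances.map (fun d => PySem.List.pyGetD d t 0)) (fun x => x)).getD 0 then 1 else 0)) := by
        have := pv_inner (fun y => if y == (PySem.List.max? (distances.map (fun d => PySem.List.pyGetD d t 0)) (fun x => x)).getD 0 then 1 else 0)
          (distances.map (fun d => PySem.List.pyGetD d t 0)) [] (distances.map g) (by simp)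
        simp only [List.nil_append, List.length_nil, Int.ofNat_zero] at this
        rw [this]
        rw [List.zipWith_map (f := fun v y => v + (if y == (PySem.List.max? (distances.map (fun d => PySem.List.pyGetD d t 0)) (fun x => x)).getD 0 then 1 else 0))
            (g := g) (h := fun d => PySem.List.pyGetD d t 0)]
        rw [List.zipWith_self]
      rw [hstep, ih (fun d => g d + (if PySem.List.pyGetD d t 0 == (PySem.List.max? (distances.map (fun d => PySem.List.pyGetD d t 0)) (fun x => x)).getD 0 then 1 else 0))]
      refine List.map_congr_left ?_
      intro d _
      simp only [List.filter_cons]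
      by_cases h : PySem.List.pyGetD d t 0 == (PySem.List.max? (distances.map (fun d => PySem.List.pyGetD d t 0)) (fun x => x)).getD 0
      · simp [h]; ring
      · simp [h]

-- zip of a list with a map over itself.
theorem pv_zip_map {α β : Type} (f : α → β) :
    ∀ (l : List α), l.zip (l.map f) = l.map (fun t => (t, f t)) := by
  intro l
  induction l with
  | nil => simp
  | cons x xs ih => simp [ih]

-- B's rival fold, characterized: the mask at step t is the conjunction of the comparisons.
theorem pv_bfold (steps : List Int) (q : List Int → Int → Bool) :
    ∀ (es : List (List Int)) (f : Int → Bool),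
    es.foldl (fun leading e =>
      (steps.zip leading).map (fun p => p.2 && q e p.1)) (steps.map f)
    = steps.map (fun t => f t && es.all (fun e => q e t)) := by
  intro es
  induction es with
  | nil => intro f; simp
  | cons e es ih =>
      intro f
      simp only [List.foldl_cons]
      have hz := pv_zip_map f steps
      rw [hz, List.map_map]
      have : ((fun p : Int × Bool => p.2 && q e p.1) ∘ fun t => (t, f t))
          = fun t => f t && q e t := rfl
      rw [this, ih (fun t => f t && q e t)]
      refine List.map_congr_left ?_
      intro t _
      simp [Bool.and_assoc]

-- Pairwise elimination computes leadership: being >= every column entry is being == the max.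
theorem pv_all_iff_max (distances : List (List Int)) (d : List Int) (hd : d ∈ distances) (t : Int) :
    (distances.all (fun e => decide (PySem.List.pyGetD d t 0 ≥ PySem.List.pyGetD e t 0)))
    = (PySem.List.pyGetD d t 0 == (PySem.List.max? (distances.map (fun d => PySem.List.pyGetD d t 0)) (fun x => x)).getD 0) := by
  have hmem : PySem.List.pyGetD d t 0 ∈ distances.map (fun d => PySem.List.pyGetD d t 0) :=
    List.mem_map.mpr ⟨d, hd, rfl⟩
  obtain ⟨m, hm⟩ : ∃ m, PySem.List.max? (distances.map (fun d => PySem.List.pyGetD d t 0)) (fun x => x) = some m := by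
    cases h : PySem.List.max? (distances.map (fun d => PySem.List.pyGetD d t 0)) (fun x => x) with
    | none =>
        rw [PySem.List.max?_eq_none_iff] at h
        rw [h] at hmem; simp at hmem
    | some m => exact ⟨m, rfl⟩
  have hmmem : m ∈ distances.map (fun d => PySem.List.pyGetD d t 0) := PySem.List.max?_mem hm
  have hmax : ∀ y ∈ distances.map (fun d => PySem.List.pyGetD d t 0), y ≤ m := by
    intro y hy; exact PySem.List.max?_isMax hm y hy
  rw [hm]
  simp only [Option.getD_some]
  by_cases hall : distances.all (fun e => decide (PySem.List.pyGetD d t 0 ≥ PySem.List.pyGetD e t 0))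
  · rw [hall]
    obtain ⟨e, he, hem⟩ := List.mem_map.mp hmmem
    have h1 : PySem.List.pyGetD e t 0 ≤ PySem.List.pyGetD d t 0 := by
      have := List.all_eq_true.mp hall e he
      simpa using this
    have h2 : PySem.List.pyGetD d t 0 ≤ m := hmax _ hmem
    have : PySem.List.pyGetD d t 0 = m := le_antisymm h2 (hem ▸ h1)
    simp [this]
  · rw [Bool.eq_false_iff.mpr hall]
    symm
    rw [beq_eq_false_iff_ne]
    intro hdm
    apply hall
    rw [List.all_eq_true]
    intro e he
    have : PySem.List.pyGetD e t 0 ≤ m := hmax _ (List.mem_map.mpr ⟨e, he, rfl⟩)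
    simpa [hdm] using this

-- B's outer append-fold is a map.
theorem pv_fold_append {α β : Type} (h : α → β) :
    ∀ (l : List α) (acc : List β), l.foldl (fun s d => s ++ [h d]) acc = acc ++ l.map h := by
  intro l
  induction l with
  | nil => intro acc; simp
  | cons x xs ih => intro acc; simp [ih]

theorem compute_max_score_eq (distances : List (List Int)) (total_time : Int) :
    compute_max_score distances total_time = compute_max_score_alt distances total_time := by
  unfold compute_max_score compute_max_score_alt
  have hrange : PySem.List.pyRange 0 total_time 1 = PySem.List.pyRange 0 (max total_time 0) 1 := by
    by_cases h : total_time ≤ 0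
    · rw [PySem.List.pyRange_one_eq_nil h, PySem.List.pyRange_one_eq_nil (by omega)]
    · rw [max_eq_left (by omega)]
  have hrepl : List.replicate distances.length (0 : Int) = distances.map (fun _ => (0 : Int)) := by
    simp
  simp only [hrange, hrepl]
  rw [pv_main distances (PySem.List.pyRange 0 (max total_time 0) 1) (fun _ => (0:Int))]
  rw [pv_fold_append]
  simp only [List.nil_append]
  congr 1
  refine congrArg _ (List.map_congr_left ?_)
  intro d hd
  have hreplT : List.replicate (PySem.List.pyRange 0 (max total_time 0) 1).length true
      = (PySem.List.pyRange 0 (max total_time 0) 1).map (fun _ => true) := by simp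
  rw [hreplT, pv_bfold (PySem.List.pyRange 0 (max total_time 0) 1) (fun e t => decide (PySem.List.pyGetD d t 0 ≥ PySem.List.pyGetD e t 0)) distances (fun _ => true)]
  have hmask : ((PySem.List.pyRange 0 (max total_time 0) 1).map
      (fun t => (fun _ => true) t && distances.all (fun e => decide (PySem.List.pyGetD d t 0 ≥ PySem.List.pyGetD e t 0))))
      = (PySem.List.pyRange 0 (max total_time 0) 1).map
      (fun t => PySem.List.pyGetD d t 0 == (PySem.List.max? (distances.map (fun d => PySem.List.pyGetD d t 0)) (fun x => x)).getD 0) := by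
    refine List.map_congr_left ?_
    intro t _
    rw [Bool.true_and]
    exact pv_all_iff_max distances d hd t
  rw [hmask]
  simp only [Int.zero_add]
  congr 1
  rw [List.count_eq_countP, List.countP_map, ← List.countP_eq_length_filter]
  refine List.countP_congr ?_
  intro t _
  simp

-- ===== VERDICT (by name: the statement is the Claim_ definition above) =====
theorem compute_max_score_spec : Claim_equal_compute_max_score := by
  intro distances total_time _ _
  exact compute_max_score_eq distances total_time
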